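-- pv_equiv track=rewrite | github.com/Juhyun22/Coding_Test | programmers/한번만등장한문자.py | solution
-- ===== SOURCE A (Python) =====
-- from collections import defaultdict
--
-- def solution(s):
--   answer = ''
--   temp =[]
--   dict = defaultdict(int)
--   for i in s:
--     dict[i] += 1
--   for k, v in dict.items():
--     if v == 1:
--       temp.append(k)
--   temp.sort()
--   answer = ''.join(temp)
--   return answer
-- ===== SOURCE B (Python) =====
-- def solution(s):
--     t = sorted(s)
--     out = []
--     while t:
--         c = t[0]
--         run = 1
--         while run < len(t) and t[run] == c:
--             run += 1
--         if run == 1: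
--             out.append(c)
--         t = t[run:]
--     return ''.join(out)
-- ===== Notes on version B (the rewrite author's own statement) =====
-- stated objective: alternative
-- what changed: Replaces A's frequency dict + items filter + sort with sorting the string once and scanning runs of equal characters, keeping exactly the singleton runs (already in sorted order).
import Mathlib
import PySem

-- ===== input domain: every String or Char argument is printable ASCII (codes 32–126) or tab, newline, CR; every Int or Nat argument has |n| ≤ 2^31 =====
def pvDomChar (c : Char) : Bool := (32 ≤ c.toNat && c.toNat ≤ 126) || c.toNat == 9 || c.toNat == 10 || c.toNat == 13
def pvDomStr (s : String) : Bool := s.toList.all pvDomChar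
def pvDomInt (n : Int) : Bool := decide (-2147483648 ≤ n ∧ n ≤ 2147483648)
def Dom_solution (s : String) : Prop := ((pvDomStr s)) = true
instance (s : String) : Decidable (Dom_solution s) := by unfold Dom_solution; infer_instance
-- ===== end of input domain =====

-- B sorts the string once and scans runs of equal characters, keeping singleton runs,
-- instead of A's frequency dict + filter + sort. Objective: alternative algorithm, same cost.

-- ===== PORT A =====
def solution (s : String) : String :=
  -- dict = defaultdict(int); for i in s: dict[i] += 1
  let d := s.toList.foldl (fun d i => d.modify i (0 : Int) (fun v => v + 1)) PySem.Dict.empty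
  -- for k, v in dict.items(): if v == 1: temp.append(k)
  let temp := d.items.foldl (fun temp kv => if kv.2 == 1 then temp ++ [kv.1] else temp) ([] : List Char)
  -- temp.sort(); ''.join(temp)
  String.ofList (PySem.List.sorted temp (fun x => x) false)

-- ===== PORT B =====
-- the outer while loop of Source B: c = t[0]; run = leading-run length of c; keep c if run == 1; t = t[run:]
def runScan (t : List Char) : List Char :=
  match t with
  | [] => []
  | c :: rest =>
    -- 'run = 1; while run < len(t) and t[run] == c: run += 1' counts 1 + the leading c-run of rest
    let run := 1 + (rest.takeWhile (fun x => x == c)).length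
    -- 'if run == 1: out.append(c)' then 't = t[run:]'
    (if run = 1 then [c] else []) ++ runScan (rest.dropWhile (fun x => x == c))
termination_by t.length
decreasing_by
  have h1 := List.length_dropWhile_le (fun x => x == c) rest
  have h2 : (c :: rest).length = rest.length + 1 := List.length_cons
  omega

def solution_alt (s : String) : String :=
  String.ofList (runScan (PySem.List.sorted s.toList (fun x => x) false))

-- ===== PRECONDITION & SPEC =====
def Spec_solution (s : String) (out : String) : Prop := out = solution_alt s
instance (s : String) (out : String) : Decidable (Spec_solution s out) := by unfold Spec_solution; infer_instance

-- ===== CLAIM (what is proved, stated in full; the proofs are below) =====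
def Claim_equal_solution : Prop := ∀ (s : String), Dom_solution s → Spec_solution s (solution s)

-- ===== LEMMAS AND PROOFS =====

-- after dropping the leading c-run of a sorted list whose elements are all ≥ c, everything left is > c
lemma lt_of_mem_dropWhile (c : Char) (l : List Char)
    (hle : ∀ x ∈ l, c ≤ x) (hp : l.Pairwise (· ≤ ·)) :
    ∀ x ∈ l.dropWhile (fun x => x == c), c < x := by
  induction l with
  | nil => simp
  | cons a l ih =>
    by_cases ha : a = c
    · subst ha
      simpa using ih (fun x hx => hle x (by simp [hx])) (List.pairwise_cons.mp hp).2
    · have hne : (a == c) = false := by simp [ha]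
      rw [List.dropWhile_cons]
      simp only [hne, Bool.false_eq_true, if_false, List.mem_cons]
      rintro x (rfl | hx)
      · exact lt_of_le_of_ne (hle x (by simp)) (Ne.symm ha)
      · exact lt_of_lt_of_le
          (lt_of_le_of_ne (hle a (by simp)) (Ne.symm ha))
          ((List.pairwise_cons.mp hp).1 x hx)

-- on a sorted list, runScan is strictly increasing and contains exactly the characters of count 1
theorem runScan_spec (L : List Char) (h : L.Pairwise (· ≤ ·)) :
    (runScan L).Pairwise (· < ·) ∧ ∀ x, x ∈ runScan L ↔ L.count x = 1 := by
  induction L using runScan.induct with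
  | case1 => simp [runScan]
  | case2 c rest ih =>
    set k := rest.takeWhile (fun x => x == c) with hk
    set d := rest.dropWhile (fun x => x == c) with hd
    have hrest : k ++ d = rest := List.takeWhile_append_dropWhile
    have hle : ∀ x ∈ rest, c ≤ x := (List.pairwise_cons.mp h).1
    have hpr : rest.Pairwise (· ≤ ·) := (List.pairwise_cons.mp h).2
    have hpd : d.Pairwise (· ≤ ·) := hpr.sublist (List.dropWhile_sublist _)
    have hlt : ∀ x ∈ d, c < x := lt_of_mem_dropWhile c rest hle hpr
    have hcd : c ∉ d := fun hc => lt_irrefl c (hlt c hc)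
    have hkc : ∀ x ∈ k, x = c := fun x hx => by
      have := List.mem_takeWhile_imp hx
      simpa using this
    obtain ⟨ihp, ihm⟩ := ih hpd
    have hsub : ∀ x ∈ runScan d, x ∈ d := fun x hx => by
      have := (ihm x).mp hx
      exact List.count_pos_iff.mp (by omega)
    have hcount : ∀ x, (c :: rest).count x = (if x = c then 1 + k.length else d.count x) := by
      intro x
      rw [← hrest, ← List.cons_append, List.count_append, List.count_cons]
      by_cases hx : x = c
      · subst hx
        have : k.count x = k.length := List.count_eq_length.mpr (fun b hb => by
          simp [hkc b hb])
        have : List.count x k = k.length := this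
        have hdc : d.count x = 0 := List.count_eq_zero.mpr hcd
        simp [this, hdc]
        omega
      · have hk0 : k.count x = 0 := List.count_eq_zero.mpr (fun hx' => hx (hkc x hx'))
        simp [hk0, hx, Ne.symm hx]
    rw [runScan]
    simp only [← hk, ← hd]
    constructor
    · by_cases hkn : 1 + k.length = 1
      · rw [if_pos hkn, List.singleton_append]
        exact List.pairwise_cons.mpr ⟨fun x hx => hlt x (hsub x hx), ihp⟩
      · rw [if_neg hkn]
        simpa using ihp
    · intro x
      rw [hcount x]
      by_cases hx : x = c
      · subst hx
        have hxd : x ∉ runScan d := fun hc => hcd (hsub x hc)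
        rw [if_pos rfl]
        by_cases hkn : 1 + k.length = 1
        · rw [if_pos hkn]
          simp [hkn]
        · rw [if_neg hkn]
          simp [hxd]
          exact fun h0 => hkn (by simp [h0])
      · rw [if_neg hx]
        by_cases hkn : 1 + k.length = 1
        · rw [if_pos hkn]
          simp [hx, ihm x]
        · rw [if_neg hkn]
          simpa using ihm x

-- the A side: the appended-then-filtered items of the counter are the distinct chars of count 1
lemma tempA_eq (t : List Char) :
    (t.foldl (fun d i => d.modify i (0 : Int) (fun v => v + 1)) PySem.Dict.empty).items.foldl
        (fun temp kv => if kv.2 == 1 then temp ++ [kv.1] else temp) ([] : List Char)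
      = (PySem.Set.ofList t).filter (fun x => t.count x = 1) := by
  rw [show (t.foldl (fun d i => d.modify i (0 : Int) (fun v => v + 1)) PySem.Dict.empty) = PySem.Dict.counter t from rfl]
  rw [PySem.List.foldl_append_if (fun (kv : Char × Int) => kv.2 == 1) (fun kv => kv.1) ((PySem.Dict.counter t).items) []]
  rw [PySem.Dict.items_counter]
  rw [List.filter_map, List.map_map]
  simp only [Function.comp_def, List.map_id_fun', List.nil_append, id_eq]
  congr 1
  funext x
  rw [Bool.eq_iff_iff]
  simp

-- ===== VERDICT (by name: the statement is the Claim_ definition above) =====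
theorem solution_spec : Claim_equal_solution := by
  intro s _
  unfold Spec_solution
  simp only [solution, solution_alt]
  rw [tempA_eq s.toList]
  set t := s.toList with ht
  set L := PySem.List.sorted t (fun x => x) false with hL
  have hLp : L.Pairwise (· ≤ ·) := PySem.List.sorted_pairwise t (fun x => x)
  obtain ⟨hp, hm⟩ := runScan_spec L hLp
  congr 1
  apply PySem.List.sorted_eq_of_perm_of_pairwise_lt
  · -- permutation: both nodup with the same members
    have hnd1 : (runScan L).Nodup := hp.imp (fun h => ne_of_lt h)
    have hnd2 : ((PySem.Set.ofList t).filter (fun x => t.count x = 1)).Nodup :=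
      (PySem.Set.nodup_ofList t).filter _
    rw [List.perm_ext_iff_of_nodup hnd1 hnd2]
    intro x
    have hcnt : L.count x = t.count x := (PySem.List.sorted_perm t (fun x => x) false).count_eq x
    rw [hm x, hcnt]
    simp only [List.mem_filter, PySem.Set.mem_ofList, decide_eq_true_eq]
    constructor
    · intro h1
      exact ⟨List.count_pos_iff.mp (by omega), h1⟩
    · exact fun h => h.2
  · exact hp
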